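-- pv_equiv track=rewrite | github.com/e4c5/kotte | backend/app/services/agtype.py | _is_edge
-- ===== SOURCE A (Python) =====
-- from typing import Any, Dict, List, Optional, Union
--
-- def _is_edge(obj: Dict[str, Any]) -> bool:
--     """True if dict looks like an AGE edge (has endpoint ids in any known format)."""
--     if "id" not in obj or "label" not in obj:
--         return False
--     # Already-parsed edge (from a previous parse() call)
--     if obj.get("source") is not None and obj.get("target") is not None:
--         return True
--     # Explicit keys we know (raw AGE format)
--     if obj.get("start_id") is not None and obj.get("end_id") is not None:
--         return True
--     if obj.get("startid") is not None and obj.get("endid") is not None: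
--         return True
--     if obj.get("startId") is not None and obj.get("endId") is not None:
--         return True
--     if obj.get("start_vertex_id") is not None and obj.get("end_vertex_id") is not None:
--         return True
--     # Fallback: any key containing 'start' and some key containing 'end' (for unknown AGE variants)
--     start_val = None
--     end_val = None
--     for k, v in obj.items():
--         if v is None:
--             continue
--         k_lower = k.lower()
--         if "start" in k_lower and ("id" in k_lower or k_lower == "startid"):
--             start_val = v
--         elif "end" in k_lower and ("id" in k_lower or k_lower == "endid"):
--             end_val = v
--     return start_val is not None and end_val is not None
-- ===== SOURCE B (Python) =====
-- def _is_edge(obj):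
--     """True if dict looks like an AGE edge (single pass over items)."""
--     if "id" not in obj or "label" not in obj:
--         return False
--     has_source = has_target = start_found = end_found = False
--     for k, v in obj.items():
--         if v is None:
--             continue
--         if k == "source":
--             has_source = True
--         elif k == "target":
--             has_target = True
--         else:
--             kl = k.lower()
--             if "start" in kl and "id" in kl:
--                 start_found = True
--             elif "end" in kl and "id" in kl:
--                 end_found = True
--     return (has_source and has_target) or (start_found and end_found)
-- ===== Notes on version B (the rewrite author's own statement) =====
-- stated objective: simpler
-- what changed: B replaces A's five sequential whole-dict lookup checks plus a separate fallback scan by one single pass over the items that accumulates four flags (source/target presence and start/end pattern matches), the four explicit raw-format pair checks being subsumed by the generic pattern.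
import Mathlib
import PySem

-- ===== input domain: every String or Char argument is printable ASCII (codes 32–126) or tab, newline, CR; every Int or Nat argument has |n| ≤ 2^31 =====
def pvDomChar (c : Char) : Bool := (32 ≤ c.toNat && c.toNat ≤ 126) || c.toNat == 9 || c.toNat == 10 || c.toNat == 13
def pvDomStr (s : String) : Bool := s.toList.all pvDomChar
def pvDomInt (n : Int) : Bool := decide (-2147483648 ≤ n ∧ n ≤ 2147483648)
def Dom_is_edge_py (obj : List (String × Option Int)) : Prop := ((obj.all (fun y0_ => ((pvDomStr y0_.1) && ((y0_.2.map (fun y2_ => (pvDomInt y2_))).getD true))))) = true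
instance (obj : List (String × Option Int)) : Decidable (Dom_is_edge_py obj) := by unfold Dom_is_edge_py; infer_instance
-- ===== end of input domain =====

-- B is a single pass over the items with four flags instead of A's five whole-dict
-- lookup checks followed by a separate fallback scan (objective: simpler).

-- ===== PORT A =====
-- fallback loop of A: last matching value wins, None values skipped
def aLoop : List (String × Option Int) → Option Int → Option Int → Option Int × Option Int
  | [], s, e => (s, e)
  | (k, v) :: rest, s, e =>
    match v with
    | none => aLoop rest s e
    | some w =>
      let kl := PySem.Str.lower k
      if PySem.Str.isIn "start" kl && (PySem.Str.isIn "id" kl || kl == "startid") then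
        aLoop rest (some w) e
      else if PySem.Str.isIn "end" kl && (PySem.Str.isIn "id" kl || kl == "endid") then
        aLoop rest s (some w)
      else aLoop rest s e

def is_edge_py (obj : List (String × Option Int)) : Bool :=
  let d := PySem.Dict.ofList obj
  if !(d.contains "id") || !(d.contains "label") then false
  else if (d.getD "source" none).isSome && (d.getD "target" none).isSome then true
  else if (d.getD "start_id" none).isSome && (d.getD "end_id" none).isSome then true
  else if (d.getD "startid" none).isSome && (d.getD "endid" none).isSome then true
  else if (d.getD "startId" none).isSome && (d.getD "endId" none).isSome then true
  else if (d.getD "start_vertex_id" none).isSome && (d.getD "end_vertex_id" none).isSome then true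
  else
    let r := aLoop d.items none none
    r.1.isSome && r.2.isSome

-- ===== PORT B =====
-- single pass: (has_source, has_target, start_found, end_found)
def bLoop : List (String × Option Int) → Bool → Bool → Bool → Bool → Bool × Bool × Bool × Bool
  | [], hs, ht, sf, ef => (hs, ht, sf, ef)
  | (k, v) :: rest, hs, ht, sf, ef =>
    match v with
    | none => bLoop rest hs ht sf ef
    | some _ =>
      if k == "source" then bLoop rest true ht sf ef
      else if k == "target" then bLoop rest hs true sf ef
      else
        let kl := PySem.Str.lower k
        if PySem.Str.isIn "start" kl && PySem.Str.isIn "id" kl then bLoop rest hs ht true ef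
        else if PySem.Str.isIn "end" kl && PySem.Str.isIn "id" kl then bLoop rest hs ht sf true
        else bLoop rest hs ht sf ef

def is_edge_py_alt (obj : List (String × Option Int)) : Bool :=
  let d := PySem.Dict.ofList obj
  if d.contains "id" && d.contains "label" then
    let r := bLoop d.items false false false false
    (r.1 && r.2.1) || (r.2.2.1 && r.2.2.2)
  else false

-- ===== PRECONDITION & SPEC =====
def Spec_is_edge_py (obj : List (String × Option Int)) (out : Bool) : Prop := out = is_edge_py_alt obj
instance (obj : List (String × Option Int)) (out : Bool) : Decidable (Spec_is_edge_py obj out) := by unfold Spec_is_edge_py; infer_instance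

-- ===== CLAIM (what is proved, stated in full; the proofs are below) =====
def Claim_equal_is_edge_py : Prop := ∀ (obj : List (String × Option Int)), Dom_is_edge_py obj → Spec_is_edge_py obj (is_edge_py obj)

-- ===== LEMMAS AND PROOFS =====

-- the generic start/end patterns, on the already-lowered key
def sPat (kl : String) : Bool := PySem.Str.isIn "start" kl && PySem.Str.isIn "id" kl
def ePat (kl : String) : Bool := PySem.Str.isIn "end" kl && PySem.Str.isIn "id" kl

-- A's extra "or kl == 'startid'" clause is redundant
theorem patA_start (kl : String) :
    (PySem.Str.isIn "start" kl && (PySem.Str.isIn "id" kl || kl == "startid")) = sPat kl := by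
  by_cases h : kl = "startid"
  · subst h; decide
  · have hb : (kl == "startid") = false := by simp [h]
    simp [sPat, hb]

theorem patA_end (kl : String) :
    (PySem.Str.isIn "end" kl && (PySem.Str.isIn "id" kl || kl == "endid")) = ePat kl := by
  by_cases h : kl = "endid"
  · subst h; decide
  · have hb : (kl == "endid") = false := by simp [h]
    simp [ePat, hb]

-- characterization of A's fallback loop
theorem aLoop_spec (L : List (String × Option Int)) (s e : Option Int) :
    (aLoop L s e).1.isSome = (s.isSome || L.any (fun p => p.2.isSome && sPat (PySem.Str.lower p.1)))
    ∧ (aLoop L s e).2.isSome = (e.isSome || L.any (fun p => p.2.isSome && !sPat (PySem.Str.lower p.1) && ePat (PySem.Str.lower p.1))) := by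
  induction L generalizing s e with
  | nil => simp [aLoop]
  | cons p rest ih =>
    obtain ⟨k, v⟩ := p
    match v with
    | none =>
      have := ih s e
      simp only [aLoop, List.any_cons]
      simpa using this
    | some w =>
      simp only [aLoop, patA_start, patA_end]
      by_cases h3 : sPat (PySem.Str.lower k) = true
      · rw [if_pos h3, (ih (some w) e).1, (ih (some w) e).2]
        simp [List.any_cons, h3]
      · rw [if_neg (by simpa using h3)]
        by_cases h4 : ePat (PySem.Str.lower k) = true
        · rw [if_pos h4, (ih s (some w)).1, (ih s (some w)).2]
          simp only [Bool.not_eq_true] at h3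
          simp [List.any_cons, h3, h4]
        · rw [if_neg (by simpa using h4), (ih s e).1, (ih s e).2]
          simp only [Bool.not_eq_true] at h3 h4
          simp [List.any_cons, h3, h4]

-- characterization of B's single pass
theorem bLoop_spec (L : List (String × Option Int)) (hs ht sf ef : Bool) :
    bLoop L hs ht sf ef =
      (hs || L.any (fun p => p.2.isSome && p.1 == "source"),
       ht || L.any (fun p => p.2.isSome && !(p.1 == "source") && p.1 == "target"),
       sf || L.any (fun p => p.2.isSome && !(p.1 == "source") && !(p.1 == "target") && sPat (PySem.Str.lower p.1)),
       ef || L.any (fun p => p.2.isSome && !(p.1 == "source") && !(p.1 == "target") && !sPat (PySem.Str.lower p.1) && ePat (PySem.Str.lower p.1))) := by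
  induction L generalizing hs ht sf ef with
  | nil => simp [bLoop]
  | cons p rest ih =>
    obtain ⟨k, v⟩ := p
    match v with
    | none =>
      have := ih hs ht sf ef
      simp only [bLoop, List.any_cons]
      simpa using this
    | some w =>
      simp only [bLoop]
      by_cases h1 : k = "source"
      · subst h1
        rw [if_pos (by simp), ih true ht sf ef]
        simp [List.any_cons]
      · rw [if_neg (by simp [h1])]
        by_cases h2 : k = "target"
        · subst h2
          rw [if_pos (by simp), ih hs true sf ef]
          simp [List.any_cons]
        · rw [if_neg (by simp [h2]),
              show (PySem.Str.isIn "start" (PySem.Str.lower k) && PySem.Str.isIn "id" (PySem.Str.lower k)) = sPat (PySem.Str.lower k) from rfl,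
              show (PySem.Str.isIn "end" (PySem.Str.lower k) && PySem.Str.isIn "id" (PySem.Str.lower k)) = ePat (PySem.Str.lower k) from rfl]
          have e1 : (k == "source") = false := by simp [h1]
          have e2 : (k == "target") = false := by simp [h2]
          by_cases h3 : sPat (PySem.Str.lower k) = true
          · rw [if_pos h3, ih hs ht true ef]
            simp [List.any_cons, e1, e2, h3]
          · rw [if_neg (by simpa using h3)]
            simp only [Bool.not_eq_true] at h3
            by_cases h4 : ePat (PySem.Str.lower k) = true
            · rw [if_pos h4, ih hs ht sf true]
              simp [List.any_cons, e1, e2, h3, h4]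
            · rw [if_neg (by simpa using h4), ih hs ht sf ef]
              simp only [Bool.not_eq_true] at h4
              simp [List.any_cons, e1, e2, h3, h4]

-- "source"/"target" never match the patterns: the elif-split is harmless
theorem src_not_sPat : sPat (PySem.Str.lower "source") = false := by decide
theorem src_not_ePat : ePat (PySem.Str.lower "source") = false := by decide
theorem tgt_not_sPat : sPat (PySem.Str.lower "target") = false := by decide
theorem tgt_not_ePat : ePat (PySem.Str.lower "target") = false := by decide

theorem any_tgt_eq (L : List (String × Option Int)) :
    L.any (fun p => p.2.isSome && !(p.1 == "source") && p.1 == "target")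
      = L.any (fun p => p.2.isSome && p.1 == "target") := by
  apply congrArg (List.any L)
  funext p
  by_cases h1 : p.1 = "source"
  · simp [h1]
  · have e1 : (p.1 == "source") = false := by simp [h1]
    simp [e1]

theorem any_sf_eq (L : List (String × Option Int)) :
    L.any (fun p => p.2.isSome && !(p.1 == "source") && !(p.1 == "target") && sPat (PySem.Str.lower p.1))
      = L.any (fun p => p.2.isSome && sPat (PySem.Str.lower p.1)) := by
  apply congrArg (List.any L)
  funext p
  by_cases h1 : p.1 = "source"
  · simp [h1, src_not_sPat]
  · by_cases h2 : p.1 = "target"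
    · simp [h2, tgt_not_sPat]
    · have e1 : (p.1 == "source") = false := by simp [h1]
      have e2 : (p.1 == "target") = false := by simp [h2]
      simp [e1, e2]

theorem any_ef_eq (L : List (String × Option Int)) :
    L.any (fun p => p.2.isSome && !(p.1 == "source") && !(p.1 == "target") && !sPat (PySem.Str.lower p.1) && ePat (PySem.Str.lower p.1))
      = L.any (fun p => p.2.isSome && !sPat (PySem.Str.lower p.1) && ePat (PySem.Str.lower p.1)) := by
  apply congrArg (List.any L)
  funext p
  by_cases h1 : p.1 = "source"
  · simp [h1, src_not_ePat]
  · by_cases h2 : p.1 = "target"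
    · simp [h2, tgt_not_ePat]
    · have e1 : (p.1 == "source") = false := by simp [h1]
      have e2 : (p.1 == "target") = false := by simp [h2]
      simp [e1, e2]

-- getD over a dict with nodup keys = any-scan over its items
theorem getD_isSome_eq_any (d : PySem.Dict String (Option Int)) (hnd : d.keys.Nodup) (k : String) :
    (d.getD k none).isSome = d.items.any (fun p => p.2.isSome && p.1 == k) := by
  by_cases h : (d.getD k none).isSome
  · rw [h]
    rw [PySem.Dict.getD_eq_get?_getD] at h
    cases hg : d.get? k with
    | none => rw [hg] at h; simp at h
    | some v =>
      have hm := PySem.Dict.mem_items_of_get?_eq_some (d := d) hg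
      rw [hg] at h
      cases v with
      | none => simp at h
      | some w =>
        symm
        rw [List.any_eq_true]
        exact ⟨(k, some w), hm, by simp⟩
  · rw [Bool.eq_false_iff.mpr h]
    symm
    rw [List.any_eq_false]
    intro p hp hcontra
    simp only [Bool.and_eq_true, beq_iff_eq] at hcontra
    obtain ⟨hv, hk⟩ := hcontra
    cases hp2 : p.2 with
    | none => rw [hp2] at hv; simp at hv
    | some w =>
      have : d.get? k = some (some w) := by
        have : (k, some w) ∈ d.items := by
          have := hp; rw [← hk, ← hp2]; simpa using hp
        exact PySem.Dict.get?_of_mem_items d this hnd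
      apply h
      rw [PySem.Dict.getD_eq_get?_getD, this]
      simp

-- each explicit raw-format pair is subsumed by the generic pattern
theorem explicit_start (d : PySem.Dict String (Option Int)) (k : String)
    (hk : sPat (PySem.Str.lower k) = true)
    (h : (d.getD k none).isSome = true) :
    d.items.any (fun p => p.2.isSome && sPat (PySem.Str.lower p.1)) = true := by
  rw [PySem.Dict.getD_eq_get?_getD] at h
  cases hg : d.get? k with
  | none => rw [hg] at h; simp at h
  | some v =>
    have hm := PySem.Dict.mem_items_of_get?_eq_some (d := d) hg
    rw [hg] at h
    cases v with
    | none => simp at h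
    | some w =>
      rw [List.any_eq_true]
      exact ⟨(k, some w), hm, by simp [hk]⟩

theorem explicit_end (d : PySem.Dict String (Option Int)) (k : String)
    (hk : (!sPat (PySem.Str.lower k) && ePat (PySem.Str.lower k)) = true)
    (h : (d.getD k none).isSome = true) :
    d.items.any (fun p => p.2.isSome && !sPat (PySem.Str.lower p.1) && ePat (PySem.Str.lower p.1)) = true := by
  rw [PySem.Dict.getD_eq_get?_getD] at h
  cases hg : d.get? k with
  | none => rw [hg] at h; simp at h
  | some v =>
    have hm := PySem.Dict.mem_items_of_get?_eq_some (d := d) hg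
    rw [hg] at h
    cases v with
    | none => simp at h
    | some w =>
      rw [List.any_eq_true]
      simp only [Bool.and_eq_true] at hk
      exact ⟨(k, some w), hm, by simp [hk.1, hk.2]⟩

-- ===== VERDICT (by name: the statement is the Claim_ definition above) =====
theorem is_edge_py_spec : Claim_equal_is_edge_py := by
  intro obj _
  unfold Spec_is_edge_py is_edge_py is_edge_py_alt
  set d := PySem.Dict.ofList obj with hd
  have hnd : d.keys.Nodup := PySem.Dict.nodup_keys_ofList obj
  by_cases hid : d.contains "id"
  case neg => simp [hid]
  by_cases hlab : d.contains "label"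
  case neg => simp [hid, hlab]
  simp only [hid, hlab, Bool.not_true, Bool.or_self, Bool.and_self, if_true]
  rw [if_neg (show ¬(false = true) from by simp)]
  rw [bLoop_spec]
  dsimp only
  simp only [Bool.false_or, any_sf_eq, any_ef_eq, any_tgt_eq]
  rw [← getD_isSome_eq_any d hnd "source", ← getD_isSome_eq_any d hnd "target",
    (aLoop_spec d.items none none).1, (aLoop_spec d.items none none).2]
  simp only [Option.isSome_none, Bool.false_or]
  set S := d.items.any (fun p => p.2.isSome && sPat (PySem.Str.lower p.1)) with hS
  set E := d.items.any (fun p => p.2.isSome && !sPat (PySem.Str.lower p.1) && ePat (PySem.Str.lower p.1)) with hE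
  have hfall : ∀ ks ke : String, sPat (PySem.Str.lower ks) = true →
      (!sPat (PySem.Str.lower ke) && ePat (PySem.Str.lower ke)) = true →
      ((d.getD ks none).isSome && (d.getD ke none).isSome) = true →
      (S && E) = true := by
    intro ks ke hks hke hpair
    simp only [Bool.and_eq_true] at hpair
    rw [hS, hE]
    exact Bool.and_eq_true_iff.mpr
      ⟨explicit_start d ks hks hpair.1, explicit_end d ke hke hpair.2⟩
  by_cases h1 : ((d.getD "source" none).isSome && (d.getD "target" none).isSome) = true
  · simp only [Bool.and_eq_true] at h1
    simp [h1.1, h1.2]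
  · rw [if_neg h1]
    have h1' : ((d.getD "source" none).isSome && (d.getD "target" none).isSome) = false :=
      Bool.eq_false_iff.mpr h1
    rw [h1', Bool.false_or]
    by_cases h2 : ((d.getD "start_id" none).isSome && (d.getD "end_id" none).isSome) = true
    · rw [if_pos h2, hfall "start_id" "end_id" (by decide) (by decide) h2]
    · rw [if_neg h2]
      by_cases h3 : ((d.getD "startid" none).isSome && (d.getD "endid" none).isSome) = true
      · rw [if_pos h3, hfall "startid" "endid" (by decide) (by decide) h3]
      · rw [if_neg h3]
        by_cases h4 : ((d.getD "startId" none).isSome && (d.getD "endId" none).isSome) = true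
        · rw [if_pos h4, hfall "startId" "endId" (by decide) (by decide) h4]
        · rw [if_neg h4]
          by_cases h5 : ((d.getD "start_vertex_id" none).isSome && (d.getD "end_vertex_id" none).isSome) = true
          · rw [if_pos h5, hfall "start_vertex_id" "end_vertex_id" (by decide) (by decide) h5]
          · rw [if_neg h5]
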